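-- pv_equiv track=rewrite | github.com/moguizhizi/MindSpeed-MM | mindspeed_rl/datasets/utils.py | get_prompt_index
-- ===== SOURCE A (Python) =====
-- def get_prompt_index(labels, ignored_label):
--     prompt_begin_list = []
--     prompt_end_list = []
--     in_group = False
--     for idx, label in enumerate(labels):
--         if label == ignored_label:
--             if not in_group:
--                 prompt_begin_list.append(idx)
--                 in_group = True
--         elif in_group:
--             prompt_end_list.append(idx)
--             in_group = False
--
--     return prompt_begin_list, prompt_end_list
-- ===== SOURCE B (Python) =====
-- def get_prompt_index(labels, ignored_label):
--     prompt_begin_list = []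
--     prompt_end_list = []
--     n = len(labels)
--     pos = 0
--     while pos < n:
--         is_ignored = labels[pos] == ignored_label
--         end = pos + 1
--         while end < n and (labels[end] == ignored_label) == is_ignored:
--             end += 1
--         if is_ignored:
--             prompt_begin_list.append(pos)
--             if end < n:
--                 prompt_end_list.append(end)
--         pos = end
--     return prompt_begin_list, prompt_end_list
-- ===== Notes on version B (the rewrite author's own statement) =====
-- stated objective: alternative
-- what changed: Replaced the per-element boolean state machine with a run-based two-pointer scan: each maximal run of (non-)ignored labels is consumed in one inner scan, begins/ends are emitted per run (an end only when the run is not the final one).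
import Mathlib
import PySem

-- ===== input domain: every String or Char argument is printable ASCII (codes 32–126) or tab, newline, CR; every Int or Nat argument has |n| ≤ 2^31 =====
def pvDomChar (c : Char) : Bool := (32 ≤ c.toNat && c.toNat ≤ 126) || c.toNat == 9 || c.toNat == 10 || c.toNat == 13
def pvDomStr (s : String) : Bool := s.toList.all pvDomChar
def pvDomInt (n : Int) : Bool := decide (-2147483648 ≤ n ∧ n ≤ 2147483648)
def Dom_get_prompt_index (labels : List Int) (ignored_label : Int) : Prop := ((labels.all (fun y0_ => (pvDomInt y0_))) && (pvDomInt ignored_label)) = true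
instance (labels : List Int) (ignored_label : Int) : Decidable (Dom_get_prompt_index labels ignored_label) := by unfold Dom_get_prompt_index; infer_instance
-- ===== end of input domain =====

-- B replaces A's per-element in_group state machine by a run-based two-pointer scan (alternative decomposition, same cost).


-- ===== PORT A =====
-- state machine over enumerate(labels): state = (idx, in_group, begins, ends)
def pvGoA (ign : Int) : List Int → Int → Bool → List Int → List Int → List Int × List Int
  | [], _, _, b, e => (b, e)
  | l :: ls, idx, ing, b, e =>
    if l = ign then
      if !ing then pvGoA ign ls (idx + 1) true (b ++ [idx]) e
      else pvGoA ign ls (idx + 1) ing b e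
    else
      if ing then pvGoA ign ls (idx + 1) false b (e ++ [idx])
      else pvGoA ign ls (idx + 1) ing b e

def get_prompt_index (labels : List Int) (ignored_label : Int) : List Int × List Int :=
  pvGoA ignored_label labels 0 false [] []

-- ===== PORT B =====
-- run-based scan: the inner while loop of Source B is the takeWhile scan of the current run
def pvGoB (ign : Int) (xs : List Int) (pos : Int) : List Int × List Int :=
  match xs with
  | [] => ([], [])
  | l :: ls =>
    if l = ign then
      let len : Int := 1 + (ls.takeWhile (fun x => x == ign)).length
      let rest := ls.dropWhile (fun x => x == ign)
      let (bs, es) := pvGoB ign rest (pos + len)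
      (pos :: bs, if rest.isEmpty then es else (pos + len) :: es)
    else
      let len : Int := 1 + (ls.takeWhile (fun x => !(x == ign))).length
      let rest := ls.dropWhile (fun x => !(x == ign))
      pvGoB ign rest (pos + len)
termination_by xs.length
decreasing_by
  · simpa using Nat.lt_succ_of_le (List.length_dropWhile_le _ _)
  · simpa using Nat.lt_succ_of_le (List.length_dropWhile_le _ _)

def get_prompt_index_alt (labels : List Int) (ignored_label : Int) : List Int × List Int :=
  pvGoB ignored_label labels 0

-- ===== PRECONDITION & SPEC =====
def Spec_get_prompt_index (labels : List Int) (ignored_label : Int) (out : List Int × List Int) : Prop := out = get_prompt_index_alt labels ignored_label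
instance (labels : List Int) (ignored_label : Int) (out : List Int × List Int) : Decidable (Spec_get_prompt_index labels ignored_label out) := by unfold Spec_get_prompt_index; infer_instance

-- ===== CLAIM (what is proved, stated in full; the proofs are below) =====
def Claim_equal_get_prompt_index : Prop := ∀ (labels : List Int) (ignored_label : Int), Dom_get_prompt_index labels ignored_label → Spec_get_prompt_index labels ignored_label (get_prompt_index labels ignored_label)

-- ===== LEMMAS AND PROOFS =====

-- the first element dropWhile keeps fails the predicate
theorem pvDropWhile_head_false (p : Int → Bool) :
    ∀ (ls : List Int) (r : Int) (rs : List Int), ls.dropWhile p = r :: rs → p r = false := by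
  intro ls
  induction ls with
  | nil => intro r rs h; simp [List.dropWhile] at h
  | cons a as ih =>
    intro r rs h
    by_cases hp : p a
    · rw [List.dropWhile_cons] at h
      simp only [hp, if_pos] at h
      exact ih r rs h
    · rw [List.dropWhile_cons] at h
      simp only [hp, if_neg, Bool.false_eq_true, not_false_eq_true] at h
      cases h
      simpa using hp

-- A passes through a run of ignored labels while in_group, changing nothing but idx
theorem pvGoA_passT (ign : Int) (run : List Int) (h : ∀ x ∈ run, x = ign) :
    ∀ (rest : List Int) (idx : Int) (b e : List Int),
      pvGoA ign (run ++ rest) idx true b e = pvGoA ign rest (idx + run.length) true b e := by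
  induction run with
  | nil => intro rest idx b e; simp [pvGoA]
  | cons l ls ih =>
    intro rest idx b e
    have hl : l = ign := h l (by simp)
    have hls : ∀ x ∈ ls, x = ign := fun x hx => h x (by simp [hx])
    rw [List.cons_append]
    show (if l = ign then pvGoA ign (ls ++ rest) (idx + 1) true b e
          else pvGoA ign (ls ++ rest) (idx + 1) false b (e ++ [idx]))
        = pvGoA ign rest (idx + (l :: ls).length) true b e
    rw [if_pos hl, ih hls]
    congr 1
    simp only [List.length_cons]
    push_cast
    ring

-- A passes through a run of non-ignored labels while not in_group
theorem pvGoA_passF (ign : Int) (run : List Int) (h : ∀ x ∈ run, x ≠ ign) :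
    ∀ (rest : List Int) (idx : Int) (b e : List Int),
      pvGoA ign (run ++ rest) idx false b e = pvGoA ign rest (idx + run.length) false b e := by
  induction run with
  | nil => intro rest idx b e; simp [pvGoA]
  | cons l ls ih =>
    intro rest idx b e
    have hl : l ≠ ign := h l (by simp)
    have hls : ∀ x ∈ ls, x ≠ ign := fun x hx => h x (by simp [hx])
    rw [List.cons_append]
    show (if l = ign then pvGoA ign (ls ++ rest) (idx + 1) true (b ++ [idx]) e
          else pvGoA ign (ls ++ rest) (idx + 1) false b e)
        = pvGoA ign rest (idx + (l :: ls).length) false b e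
    rw [if_neg hl, ih hls]
    congr 1
    simp only [List.length_cons]
    push_cast
    ring

-- main invariant: A's state machine from a fresh (not in_group) state equals B's run scan
theorem pvGoA_eq_pvGoB (ign : Int) :
    ∀ (n : Nat) (xs : List Int), xs.length ≤ n → ∀ (idx : Int) (b e : List Int),
      pvGoA ign xs idx false b e = (b ++ (pvGoB ign xs idx).1, e ++ (pvGoB ign xs idx).2) := by
  intro n
  induction n with
  | zero =>
    intro xs hlen idx b e
    have : xs = [] := List.eq_nil_of_length_eq_zero (Nat.le_zero.mp hlen)
    subst this
    simp [pvGoA, pvGoB]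
  | succ n ih =>
    intro xs hlen idx b e
    match xs with
    | [] => simp [pvGoA, pvGoB]
    | l :: ls =>
      by_cases hl : l = ign
      · -- ignored run: A enters the group at idx and passes through the run
        have hsplit : ls = ls.takeWhile (fun x => x == ign) ++ ls.dropWhile (fun x => x == ign) :=
          (List.takeWhile_append_dropWhile ..).symm
        have hmem : ∀ x ∈ ls.takeWhile (fun x => x == ign), x = ign := by
          intro x hx
          simpa using List.mem_takeWhile_imp hx
        have hA : pvGoA ign (l :: ls) idx false b e
            = pvGoA ign (ls.dropWhile (fun x => x == ign))
                (idx + 1 + (ls.takeWhile (fun x => x == ign)).length) true (b ++ [idx]) e := by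
          show (if l = ign then pvGoA ign ls (idx + 1) true (b ++ [idx]) e
                else pvGoA ign ls (idx + 1) false b e) = _
          rw [if_pos hl]
          conv_lhs => rw [hsplit]
          rw [pvGoA_passT ign _ hmem]
        have hB : pvGoB ign (l :: ls) idx
            = ((idx :: (pvGoB ign (ls.dropWhile (fun x => x == ign))
                  (idx + (1 + ((ls.takeWhile (fun x => x == ign)).length : Int)))).1),
               (if (ls.dropWhile (fun x => x == ign)).isEmpty then
                  (pvGoB ign (ls.dropWhile (fun x => x == ign))
                    (idx + (1 + ((ls.takeWhile (fun x => x == ign)).length : Int)))).2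
                else (idx + (1 + ((ls.takeWhile (fun x => x == ign)).length : Int))) ::
                  (pvGoB ign (ls.dropWhile (fun x => x == ign))
                    (idx + (1 + ((ls.takeWhile (fun x => x == ign)).length : Int)))).2)) := by
          rw [pvGoB]
          simp only [if_pos hl]
        have harith : idx + 1 + ((ls.takeWhile (fun x => x == ign)).length : Int)
            = idx + (1 + ((ls.takeWhile (fun x => x == ign)).length : Int)) := by ring
        cases hdw : ls.dropWhile (fun x => x == ign) with
        | nil =>
          rw [hA, hdw, hB, hdw]
          simp [pvGoA, pvGoB]
        | cons r rs =>
          have hrne : r ≠ ign := by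
            have := pvDropWhile_head_false (fun x => x == ign) ls r rs hdw
            simpa using this
          -- A: leaves the group at the index right after the ignored run
          have hA2 : pvGoA ign (l :: ls) idx false b e
              = pvGoA ign rs (idx + 1 + (ls.takeWhile (fun x => x == ign)).length + 1) false
                  (b ++ [idx]) (e ++ [idx + 1 + (ls.takeWhile (fun x => x == ign)).length]) := by
            rw [hA, hdw]
            show (if r = ign then _ else if true then _ else _) = _
            rw [if_neg hrne]
            rfl
          -- split rs into the non-ignored run and the remainder
          have hsplit2 : rs = rs.takeWhile (fun x => !(x == ign)) ++ rs.dropWhile (fun x => !(x == ign)) :=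
            (List.takeWhile_append_dropWhile ..).symm
          have hmem2 : ∀ x ∈ rs.takeWhile (fun x => !(x == ign)), x ≠ ign := by
            intro x hx
            simpa using List.mem_takeWhile_imp hx
          have hA3 : pvGoA ign (l :: ls) idx false b e
              = pvGoA ign (rs.dropWhile (fun x => !(x == ign)))
                  (idx + 1 + (ls.takeWhile (fun x => x == ign)).length + 1
                    + (rs.takeWhile (fun x => !(x == ign))).length) false
                  (b ++ [idx]) (e ++ [idx + 1 + (ls.takeWhile (fun x => x == ign)).length]) := by
            rw [hA2]
            conv_lhs => rw [hsplit2]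
            exact pvGoA_passF ign _ hmem2 _ _ _ _
          have hlen2 : (rs.dropWhile (fun x => !(x == ign))).length ≤ n := by
            have h1 : (rs.dropWhile (fun x => !(x == ign))).length ≤ rs.length :=
              List.length_dropWhile_le _ _
            have h2 : (r :: rs).length ≤ ls.length := by
              rw [← hdw]; exact List.length_dropWhile_le _ _
            simp only [List.length_cons] at h2 hlen
            omega
          have ihrec := ih (rs.dropWhile (fun x => !(x == ign))) hlen2
            (idx + 1 + (ls.takeWhile (fun x => x == ign)).length + 1
              + (rs.takeWhile (fun x => !(x == ign))).length)
            (b ++ [idx]) (e ++ [idx + 1 + (ls.takeWhile (fun x => x == ign)).length])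
          -- B on the tail run
          have hB2 : pvGoB ign (r :: rs) (idx + (1 + ((ls.takeWhile (fun x => x == ign)).length : Int)))
              = pvGoB ign (rs.dropWhile (fun x => !(x == ign)))
                  (idx + (1 + ((ls.takeWhile (fun x => x == ign)).length : Int))
                    + (1 + ((rs.takeWhile (fun x => !(x == ign))).length : Int))) := by
            rw [pvGoB]
            simp only [if_neg hrne]
          have harith2 : idx + 1 + ((ls.takeWhile (fun x => x == ign)).length : Int) + 1
                + ((rs.takeWhile (fun x => !(x == ign))).length : Int)
              = idx + (1 + ((ls.takeWhile (fun x => x == ign)).length : Int))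
                + (1 + ((rs.takeWhile (fun x => !(x == ign))).length : Int)) := by ring
          rw [hA3, ihrec, hB, hdw, hB2, harith2, harith]
          simp
      · -- non-ignored run: A passes through with nothing recorded
        have hsplit : ls = ls.takeWhile (fun x => !(x == ign)) ++ ls.dropWhile (fun x => !(x == ign)) :=
          (List.takeWhile_append_dropWhile ..).symm
        have hmem : ∀ x ∈ ls.takeWhile (fun x => !(x == ign)), x ≠ ign := by
          intro x hx
          simpa using List.mem_takeWhile_imp hx
        have hA : pvGoA ign (l :: ls) idx false b e
            = pvGoA ign (ls.dropWhile (fun x => !(x == ign)))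
                (idx + 1 + (ls.takeWhile (fun x => !(x == ign))).length) false b e := by
          show (if l = ign then pvGoA ign ls (idx + 1) true (b ++ [idx]) e
                else pvGoA ign ls (idx + 1) false b e) = _
          rw [if_neg hl]
          conv_lhs => rw [hsplit]
          rw [pvGoA_passF ign _ hmem]
        have hB : pvGoB ign (l :: ls) idx
            = pvGoB ign (ls.dropWhile (fun x => !(x == ign)))
                (idx + (1 + ((ls.takeWhile (fun x => !(x == ign))).length : Int))) := by
          rw [pvGoB]
          simp only [if_neg hl]
        have hlen2 : (ls.dropWhile (fun x => !(x == ign))).length ≤ n := by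
          have h1 : (ls.dropWhile (fun x => !(x == ign))).length ≤ ls.length :=
            List.length_dropWhile_le _ _
          simp only [List.length_cons] at hlen
          omega
        have harith : idx + 1 + ((ls.takeWhile (fun x => !(x == ign))).length : Int)
            = idx + (1 + ((ls.takeWhile (fun x => !(x == ign))).length : Int)) := by ring
        rw [hA, hB, harith]
        exact ih _ hlen2 _ b e

-- ===== VERDICT (by name: the statement is the Claim_ definition above) =====
theorem get_prompt_index_spec : Claim_equal_get_prompt_index := by
  intro labels ign _
  unfold Spec_get_prompt_index get_prompt_index get_prompt_index_alt
  simpa using pvGoA_eq_pvGoB ign labels.length labels le_rfl 0 [] []
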